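-- pv_equiv track=rewrite | github.com/yubinbai/Codejam | europython 2011/irregularExpressions/main.py | solve
-- ===== SOURCE A (Python) =====
-- def solve(par):
--     S = par
--     pos = []
--     vowels = []
--     for i, v in enumerate(S):
--         if v in list('aeiou'):
--             pos.append(i)
--             vowels.append(v)
--     S1 = ''.join(vowels)
--     for i in range(len(S1) - 2):
--         for j in range(i + 3, len(S1) - 1):
--             if S1[i:i + 2] == S1[j:j + 2] and \
--                     S[pos[i]:pos[i + 1]] == S[pos[j]:pos[j + 1]]:
--                 return 'Spell!'
--     return 'Nothing.'
-- ===== SOURCE B (Python) =====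
-- def solve(par):
--     S = par
--     pv = [(i, v) for i, v in enumerate(S) if v in 'aeiou']
--     pos = [i for i, v in pv]
--     S1 = ''.join(v for i, v in pv)
--     first = {}
--     for k in range(len(S1) - 1):
--         key = (S1[k:k + 2], S[pos[k]:pos[k + 1]])
--         if key in first:
--             if first[key] <= k - 3:
--                 return 'Spell!'
--         else:
--             first[key] = k
--     return 'Nothing.'
-- ===== Notes on version B (the rewrite author's own statement) =====
-- stated objective: faster
-- what changed: Replaces A's quadratic nested scan over all vowel-index pairs by a single pass that hashes each vowel index's (two-vowel, intervening-substring) key into a dict keeping the earliest index per key, reporting a match as soon as some index sees its key with an earliest occurrence at distance at least 3.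
import Mathlib
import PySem

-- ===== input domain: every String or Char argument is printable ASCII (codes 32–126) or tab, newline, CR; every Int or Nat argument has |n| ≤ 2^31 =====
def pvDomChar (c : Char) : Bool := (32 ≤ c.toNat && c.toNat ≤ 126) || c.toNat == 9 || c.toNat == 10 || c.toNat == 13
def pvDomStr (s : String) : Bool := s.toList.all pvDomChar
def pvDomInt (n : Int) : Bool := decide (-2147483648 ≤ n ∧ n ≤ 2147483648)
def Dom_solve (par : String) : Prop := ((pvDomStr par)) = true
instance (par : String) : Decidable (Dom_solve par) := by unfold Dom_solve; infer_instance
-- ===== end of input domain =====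

-- B replaces A's quadratic scan over index pairs by one dict-keyed pass keeping the earliest index per key (faster, asymptotic).

-- ===== PORT A =====
-- the inner comparison of A's nested loop, step for step (two slice comparisons joined by 'and')
def solveCond (S S1 : List Char) (pos : List Int) (i j : Int) : Bool :=
  (PySem.List.slice S1 (some i) (some (i + 2)) == PySem.List.slice S1 (some j) (some (j + 2))) &&
  (PySem.List.slice S (some (PySem.List.pyGetD pos i 0)) (some (PySem.List.pyGetD pos (i + 1) 0)) ==
   PySem.List.slice S (some (PySem.List.pyGetD pos j 0)) (some (PySem.List.pyGetD pos (j + 1) 0)))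

def solve (par : String) : String :=
  let S := par.toList
  -- the first loop: append to pos/vowels when the character is a vowel
  let pv := (PySem.List.enumerate S 0).foldl
      (fun acc iv => if ("aeiou".toList).contains iv.2 then (acc.1 ++ [iv.1], acc.2 ++ [iv.2]) else acc)
      ([], [])
  let pos := pv.1
  let S1 := pv.2
  -- the nested loops with early return 'Spell!'
  if (PySem.List.pyRange 0 ((S1.length : Int) - 2) 1).any (fun i =>
       (PySem.List.pyRange (i + 3) ((S1.length : Int) - 1) 1).any (fun j => solveCond S S1 pos i j))
  then "Spell!" else "Nothing."

-- ===== PORT B =====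
-- the key B hashes for index k: (S1[k:k+2], S[pos[k]:pos[k+1]])
def altKey (S S1 : List Char) (pos : List Int) (k : Int) : List Char × List Char :=
  (PySem.List.slice S1 (some k) (some (k + 2)),
   PySem.List.slice S (some (PySem.List.pyGetD pos k 0)) (some (PySem.List.pyGetD pos (k + 1) 0)))

-- B's single pass: dict 'first' maps a key to the earliest index seen with it
def altLoop (S S1 : List Char) (pos : List Int) :
    List Int → PySem.Dict (List Char × List Char) Int → String
  | [], _ => "Nothing."
  | k :: ks, d =>
    let key := altKey S S1 pos k
    match d.get? key with
    | some v => if v ≤ k - 3 then "Spell!" else altLoop S S1 pos ks d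
    | none => altLoop S S1 pos ks (d.insert key k)

def solve_alt (par : String) : String :=
  let S := par.toList
  let pv := (PySem.List.enumerate S 0).filter (fun p => ("aeiou".toList).contains p.2)
  let pos := pv.map (·.1)
  let S1 := pv.map (·.2)   -- ''.join over single characters = the list of those characters
  altLoop S S1 pos (PySem.List.pyRange 0 ((S1.length : Int) - 1) 1) PySem.Dict.empty

-- ===== PRECONDITION & SPEC =====
def Spec_solve (par : String) (out : String) : Prop := out = solve_alt par
instance (par : String) (out : String) : Decidable (Spec_solve par out) := by unfold Spec_solve; infer_instance

-- ===== CLAIM (what is proved, stated in full; the proofs are below) =====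
def Claim_equal_solve : Prop := ∀ (par : String), Dom_solve par → Spec_solve par (solve par)

-- ===== LEMMAS AND PROOFS =====

-- A's first loop builds exactly B's (filter, then project) pair of lists
lemma foldl_pv (l : List (Int × Char)) (a : List Int) (b : List Char) :
    l.foldl
      (fun acc iv => if ("aeiou".toList).contains iv.2 then (acc.1 ++ [iv.1], acc.2 ++ [iv.2]) else acc)
      (a, b)
    = (a ++ (l.filter (fun p => ("aeiou".toList).contains p.2)).map (·.1),
       b ++ (l.filter (fun p => ("aeiou".toList).contains p.2)).map (·.2)) := by
  induction l generalizing a b with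
  | nil => simp
  | cons x xs ih =>
    rw [List.foldl_cons, List.filter_cons]
    cases h : ("aeiou".toList).contains x.2
    · rw [if_neg (by simp), if_neg (by simp), ih]
    · rw [if_pos rfl, if_pos rfl, ih]
      simp

-- A's comparison is equality of B's keys
lemma cond_iff (S S1 : List Char) (pos : List Int) (i j : Int) :
    solveCond S S1 pos i j = true ↔ altKey S S1 pos i = altKey S S1 pos j := by
  simp [solveCond, altKey, Prod.ext_iff]

-- B's loop returns one of the two literals
lemma altLoop_cases (S S1 : List Char) (pos : List Int) :
    ∀ (ks : List Int) (d : PySem.Dict (List Char × List Char) Int),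
      altLoop S S1 pos ks d = "Spell!" ∨ altLoop S S1 pos ks d = "Nothing." := by
  intro ks
  induction ks with
  | nil => intro d; right; rfl
  | cons k ks ih =>
    intro d
    simp only [altLoop]
    cases h : d.get? (altKey S S1 pos k) with
    | none => exact ih _
    | some v =>
      by_cases hv : v ≤ k - 3
      · simp [hv]
      · simpa [hv] using ih d

-- invariant: d holds, for every key seen among indices [0, m), a minimal witness index
lemma altLoop_iff (S S1 : List Char) (pos : List Int) :
    ∀ (cnt : Nat) (m : Int) (d : PySem.Dict (List Char × List Char) Int), 0 ≤ m →
      (∀ key v, d.get? key = some v → 0 ≤ v ∧ v < m ∧ altKey S S1 pos v = key) →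
      (∀ i : Int, 0 ≤ i → i < m → ∃ v, d.get? (altKey S S1 pos i) = some v ∧ v ≤ i) →
      (altLoop S S1 pos (PySem.List.pyRange m (m + cnt) 1) d = "Spell!" ↔
        ∃ k, m ≤ k ∧ k < m + cnt ∧ ∃ i, 0 ≤ i ∧ i ≤ k - 3 ∧ altKey S S1 pos i = altKey S S1 pos k) := by
  intro cnt
  induction cnt with
  | zero =>
    intro m d hm hinv hcomp
    rw [PySem.List.pyRange_one_eq_nil (by omega)]
    simp only [altLoop]
    constructor
    · intro h; exact absurd h (by decide)
    · rintro ⟨k, hk1, hk2, -⟩; omega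
  | succ cnt ih =>
    intro m d hm hinv hcomp
    have hcons : PySem.List.pyRange m (m + ((cnt : Int) + 1)) 1
        = m :: PySem.List.pyRange (m + 1) ((m + 1) + (cnt : Int)) 1 := by
      rw [PySem.List.pyRange_one_cons (by omega)]
      congr 1; ring_nf
    push_cast
    rw [hcons]
    simp only [altLoop]
    cases hget : d.get? (altKey S S1 pos m) with
    | some v =>
      obtain ⟨hv0, hvm, hvk⟩ := hinv _ _ hget
      by_cases hv : v ≤ m - 3
      · simp only [hv, if_pos]
        constructor
        · intro _; exact ⟨m, le_refl _, by omega, v, hv0, hv, hvk⟩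
        · intro _; trivial
      · simp only [hv, if_neg, not_false_iff]
        rw [ih (m + 1) d (by omega)
              (fun key w hw => by obtain ⟨h1, h2, h3⟩ := hinv key w hw; exact ⟨h1, by omega, h3⟩)
              (fun i hi0 hi1 => by
                by_cases him : i < m
                · exact hcomp i hi0 him
                · have hieq : i = m := by omega
                  refine ⟨v, ?_, by omega⟩
                  rw [hieq]; exact hget)]
        constructor
        · rintro ⟨k, hk1, hk2, w⟩; exact ⟨k, by omega, by omega, w⟩
        · rintro ⟨k, hk1, hk2, i, hi0, hi3, hik⟩
          rcases eq_or_lt_of_le hk1 with hkm | hkm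
          · exfalso
            obtain ⟨w, hw, hwle⟩ := hcomp i hi0 (by omega)
            rw [hik, ← hkm, hget] at hw
            have hvw := Option.some.inj hw
            omega
          · exact ⟨k, by omega, by omega, i, hi0, hi3, hik⟩
    | none =>
      have hnew : ∀ i : Int, 0 ≤ i → i < m → altKey S S1 pos i ≠ altKey S S1 pos m := by
        intro i hi0 him heq
        obtain ⟨w, hw, -⟩ := hcomp i hi0 him
        rw [heq, hget] at hw; simp at hw
      rw [ih (m + 1) (d.insert (altKey S S1 pos m) m) (by omega)
            (fun key w hw => by
              by_cases hkey : key = altKey S S1 pos m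
              · subst hkey
                rw [PySem.Dict.get?_insert_self] at hw
                have hwm := Option.some.inj hw
                rw [← hwm]; exact ⟨hm, by omega, rfl⟩
              · rw [PySem.Dict.get?_insert_of_ne _ _ hkey] at hw
                obtain ⟨h1, h2, h3⟩ := hinv key w hw; exact ⟨h1, by omega, h3⟩)
            (fun i hi0 hi1 => by
              by_cases him : i < m
              · obtain ⟨w, hw, hwle⟩ := hcomp i hi0 him
                refine ⟨w, ?_, hwle⟩
                rw [PySem.Dict.get?_insert_of_ne _ _ (hnew i hi0 him)]
                exact hw
              · have hieq : i = m := by omega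
                refine ⟨m, ?_, by omega⟩
                rw [hieq]; exact PySem.Dict.get?_insert_self _ _ _)]
      constructor
      · rintro ⟨k, hk1, hk2, w⟩; exact ⟨k, by omega, by omega, w⟩
      · rintro ⟨k, hk1, hk2, i, hi0, hi3, hik⟩
        rcases eq_or_lt_of_le hk1 with hkm | hkm
        · exact absurd hik (by rw [← hkm]; exact hnew i hi0 (by omega))
        · exact ⟨k, by omega, by omega, i, hi0, hi3, hik⟩

-- ===== VERDICT (by name: the statement is the Claim_ definition above) =====
theorem solve_spec : Claim_equal_solve := by
  intro par _
  unfold Spec_solve solve solve_alt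
  simp only [foldl_pv, List.nil_append]
  set S := par.toList with hS
  set pv := (PySem.List.enumerate S 0).filter (fun p => ("aeiou".toList).contains p.2) with hpv
  set pos := pv.map (·.1) with hpos
  set S1 := pv.map (·.2) with hS1
  set n : Int := (S1.length : Int) with hn
  -- B side as an existential
  have hB : altLoop S S1 pos (PySem.List.pyRange 0 (n - 1) 1) PySem.Dict.empty = "Spell!" ↔
      ∃ k : Int, 0 ≤ k ∧ k < n - 1 ∧ ∃ i, 0 ≤ i ∧ i ≤ k - 3 ∧ altKey S S1 pos i = altKey S S1 pos k := by
    have hrange : PySem.List.pyRange 0 (n - 1) 1 = PySem.List.pyRange 0 (0 + ((n - 1).toNat : Int)) 1 := by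
      by_cases h1 : 1 ≤ n
      · congr 1; omega
      · rw [PySem.List.pyRange_one_eq_nil (by omega), PySem.List.pyRange_one_eq_nil (by omega)]
    rw [hrange,
      altLoop_iff S S1 pos (n - 1).toNat 0 PySem.Dict.empty (le_refl 0)
        (fun key v hv => by simp [PySem.Dict.empty, PySem.Dict.get?] at hv)
        (fun i hi0 hi1 => by omega)]
    constructor
    · rintro ⟨k, h1, h2, w⟩; exact ⟨k, h1, by omega, w⟩
    · rintro ⟨k, h1, h2, w⟩; exact ⟨k, h1, by omega, w⟩
  -- A side as an existential
  have hA : (PySem.List.pyRange 0 (n - 2) 1).any (fun i =>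
        (PySem.List.pyRange (i + 3) (n - 1) 1).any (fun j => solveCond S S1 pos i j)) = true ↔
      ∃ i : Int, 0 ≤ i ∧ i < n - 2 ∧ ∃ j, i + 3 ≤ j ∧ j < n - 1 ∧ altKey S S1 pos i = altKey S S1 pos j := by
    simp only [List.any_eq_true, PySem.List.mem_pyRange_one, cond_iff]
    constructor
    · rintro ⟨i, ⟨hi0, hi2⟩, j, ⟨hj1, hj2⟩, hk⟩; exact ⟨i, hi0, hi2, j, hj1, hj2, hk⟩
    · rintro ⟨i, hi0, hi2, j, hj1, hj2, hk⟩; exact ⟨i, ⟨hi0, hi2⟩, j, ⟨hj1, hj2⟩, hk⟩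
  by_cases hcase : (PySem.List.pyRange 0 (n - 2) 1).any (fun i =>
      (PySem.List.pyRange (i + 3) (n - 1) 1).any (fun j => solveCond S S1 pos i j)) = true
  · rw [if_pos hcase]
    obtain ⟨i, hi0, hi2, j, hj1, hj2, hk⟩ := hA.mp hcase
    exact (hB.mpr ⟨j, by omega, hj2, i, hi0, by omega, hk⟩).symm
  · rw [if_neg hcase]
    rcases altLoop_cases S S1 pos (PySem.List.pyRange 0 (n - 1) 1) PySem.Dict.empty with hsp | hno
    · obtain ⟨k, hk0, hk1, i, hi0, hi3, hik⟩ := hB.mp hsp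
      exact absurd (hA.mpr ⟨i, hi0, by omega, k, by omega, hk1, hik⟩) hcase
    · exact hno.symm
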